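-- pv_equiv track=rewrite | github.com/Shivam-baghel/Python_Scaler | 2. Data Structures and Algorithm/1. Intermediate/08. Bit Manipulations - 2/Homework/Q3. Subarrays with bitwise or 1.py | solve
-- ===== SOURCE A (Python) =====
-- def solve(A, B):
--     n = len(B)
--     t = A * (A + 1) // 2  # counting total subarray
--     cnt = 0
--     sum = 0
--     for i in range(n):
--         if (
--             B[i] == 0
--         ):  # by counting zeroes we can subtract the total subarray with the subarray with only Zero
--             cnt += 1
--         else:
--             sum += cnt * (cnt + 1) // 2
--             cnt = 0
--     if cnt >= 1:
--         sum += cnt * (cnt + 1) // 2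
--     return t - sum
-- ===== SOURCE B (Python) =====
-- def solve(A, B):
--     t = A * (A + 1) // 2
--     pos = [-1] + [i for i, x in enumerate(B) if x != 0] + [len(B)]
--     z = 0
--     for a, b in zip(pos, pos[1:]):
--         g = b - a - 1
--         z += g * (g + 1) // 2
--     return t - z
-- ===== Notes on version B (the rewrite author's own statement) =====
-- stated objective: alternative
-- what changed: Instead of a stateful run-length counter reset inside one scan plus a trailing flush, B builds the list of nonzero boundary positions and sums g*(g+1)//2 over the gaps between consecutive boundaries, subtracting that from A*(A+1)//2.
import Mathlib
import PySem

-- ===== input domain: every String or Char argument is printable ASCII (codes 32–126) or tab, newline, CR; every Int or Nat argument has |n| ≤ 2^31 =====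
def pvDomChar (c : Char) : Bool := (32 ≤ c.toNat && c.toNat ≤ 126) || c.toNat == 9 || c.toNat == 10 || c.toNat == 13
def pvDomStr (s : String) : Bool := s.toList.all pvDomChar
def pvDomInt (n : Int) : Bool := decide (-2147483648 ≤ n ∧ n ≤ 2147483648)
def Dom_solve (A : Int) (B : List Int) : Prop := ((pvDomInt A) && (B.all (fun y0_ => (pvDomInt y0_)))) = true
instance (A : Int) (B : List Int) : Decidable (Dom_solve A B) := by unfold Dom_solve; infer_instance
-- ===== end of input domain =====

-- B changes the decomposition: boundary positions of nonzero entries + gap sums, instead of A's running zero-counter with resets; same O(n) cost.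

-- ===== PORT A =====
-- one scan with a zero-run counter, flushed on each nonzero and once at the end
def solve (A : Int) (B : List Int) : Int :=
  let t := PySem.Int.floordiv (A * (A + 1)) 2
  let st := B.foldl
    (fun (st : Int × Int) x =>
      if x = 0 then (st.1 + 1, st.2)
      else (0, st.2 + PySem.Int.floordiv (st.1 * (st.1 + 1)) 2))
    (0, 0)
  let s := if st.1 ≥ 1 then st.2 + PySem.Int.floordiv (st.1 * (st.1 + 1)) 2 else st.2
  t - s

-- ===== PORT B =====
-- boundary list pos = [-1] ++ nonzero indices ++ [len B]; sum tri over the gaps of consecutive pairs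
def solve_alt (A : Int) (B : List Int) : Int :=
  let t := PySem.Int.floordiv (A * (A + 1)) 2
  let pos : List Int :=
    (-1) :: (((PySem.List.enumerate B).filter (fun p => p.2 ≠ 0)).map (fun p => p.1)) ++ [(B.length : Int)]
  let z := (pos.zip pos.tail).foldl
    (fun s p => s + PySem.Int.floordiv ((p.2 - p.1 - 1) * ((p.2 - p.1 - 1) + 1)) 2) 0
  t - z

-- ===== PRECONDITION & SPEC =====
def Spec_solve (A : Int) (B : List Int) (out : Int) : Prop := out = solve_alt A B
instance (A : Int) (B : List Int) (out : Int) : Decidable (Spec_solve A B out) := by unfold Spec_solve; infer_instance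

-- ===== CLAIM (what is proved, stated in full; the proofs are below) =====
def Claim_equal_solve : Prop := ∀ (A : Int) (B : List Int), Dom_solve A B → Spec_solve A B (solve A B)

-- ===== LEMMAS AND PROOFS =====

/-- triangular count of subarrays of a zero-run of length c -/
def pvTri (c : Int) : Int := PySem.Int.floordiv (c * (c + 1)) 2

/-- reference: total zero-subarray count, scanning with pending run length c -/
def pvZrun (c : Int) : List Int → Int
  | [] => pvTri c
  | x :: bs => if x = 0 then pvZrun (c + 1) bs else pvTri c + pvZrun 0 bs

/-- gap sum over consecutive pairs of a position list -/
def pvGap : List Int → Int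
  | a :: b :: r => pvTri (b - a - 1) + pvGap (b :: r)
  | _ => 0

def pvStep (st : Int × Int) (x : Int) : Int × Int :=
  if x = 0 then (st.1 + 1, st.2)
  else (0, st.2 + PySem.Int.floordiv (st.1 * (st.1 + 1)) 2)

theorem pvTri_zero : pvTri 0 = 0 := by decide

theorem pvA_loop (B : List Int) : ∀ c s : Int, 0 ≤ c →
    (let st := B.foldl pvStep (c, s);
     if st.1 ≥ 1 then st.2 + PySem.Int.floordiv (st.1 * (st.1 + 1)) 2 else st.2)
    = s + pvZrun c B := by
  induction B with
  | nil =>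
    intro c s hc
    simp only [List.foldl, pvZrun]
    split
    · rfl
    · have h0 : c = 0 := by omega
      simp [h0, pvTri_zero]
  | cons x bs ih =>
    intro c s hc
    simp only [List.foldl, pvStep, pvZrun]
    by_cases hx : x = 0
    · simp only [hx]
      exact ih (c + 1) s (by omega)
    · simp only [if_neg hx]
      rw [ih 0 _ (le_refl 0)]
      show s + pvTri c + pvZrun 0 bs = s + (pvTri c + pvZrun 0 bs)
      ring

/-- foldl with an additive accumulator peels off its initial value -/
theorem pvFoldl_init (g : Int × Int → Int) (l : List (Int × Int)) :
    ∀ a : Int, l.foldl (fun s p => s + g p) a = a + l.foldl (fun s p => s + g p) 0 := by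
  induction l with
  | nil => intro a; simp
  | cons p r ih =>
    intro a
    simp only [List.foldl]
    rw [ih (a + g p), ih (0 + g p)]
    ring

/-- zipWith-fold recursion behind the zip-fold -/
theorem pvZW : ∀ (r : List Int) (a : Int),
    (List.zipWith Prod.mk (a :: r) r).foldl
      (fun s p => s + PySem.Int.floordiv ((p.2 - p.1 - 1) * ((p.2 - p.1 - 1) + 1)) 2) 0
    = pvGap (a :: r) := by
  intro r
  induction r with
  | nil => intro a; rfl
  | cons b r' ih =>
    intro a
    show List.foldl _ (0 + PySem.Int.floordiv ((b - a - 1) * ((b - a - 1) + 1)) 2) (List.zipWith Prod.mk (b :: r') r') = _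
    rw [pvFoldl_init, ih b]
    show 0 + pvTri (b - a - 1) + pvGap (b :: r') = pvGap (a :: b :: r')
    simp [pvGap]

/-- the zip-fold in solve_alt computes pvGap -/
theorem pvZip_eq_gap : ∀ pos : List Int,
    (pos.zip pos.tail).foldl
      (fun s p => s + PySem.Int.floordiv ((p.2 - p.1 - 1) * ((p.2 - p.1 - 1) + 1)) 2) 0
    = pvGap pos := by
  intro pos
  match pos with
  | [] => rfl
  | a :: r => exact pvZW r a

/-- pvGap only depends on differences: shifting every position by 1 preserves it -/
theorem pvGap_shift : ∀ pos : List Int, pvGap (pos.map (· + 1)) = pvGap pos := by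
  intro pos
  match pos with
  | [] => rfl
  | [a] => rfl
  | a :: b :: r =>
    show pvTri ((b + 1) - (a + 1) - 1) + pvGap ((b :: r).map (· + 1)) = pvTri (b - a - 1) + pvGap (b :: r)
    rw [pvGap_shift (b :: r)]
    congr 1
    ring_nf

def pvIdxs (B : List Int) : List Int :=
  ((PySem.List.enumerate B).filter (fun p => p.2 ≠ 0)).map (fun p => p.1)

theorem pvEnum_shift (B : List Int) : ∀ s : Int,
    PySem.List.enumerate B (s + 1) = (PySem.List.enumerate B s).map (fun p => (p.1 + 1, p.2)) := by
  induction B with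
  | nil => intro s; simp [PySem.List.enumerate_nil]
  | cons x bs ih =>
    intro s
    rw [PySem.List.enumerate_cons, PySem.List.enumerate_cons, List.map_cons, ih (s + 1)]

/-- mapping the index-shift through filter-then-project -/
theorem pvFM : ∀ l : List (Int × Int),
    (((l.map (fun p => (p.1 + 1, p.2))).filter (fun p => p.2 ≠ 0)).map (fun p => p.1))
    = (((l.filter (fun p => p.2 ≠ 0)).map (fun p => p.1)).map (· + 1)) := by
  intro l
  induction l with
  | nil => rfl
  | cons p r ih =>
    by_cases hp : p.2 = 0
    · simp only [List.map_cons, List.filter_cons, hp]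
      simpa using ih
    · simp only [List.map_cons, List.filter_cons, hp]
      simp only [ne_eq, hp, not_false_eq_true, decide_true, if_true, List.map_cons]
      rw [ih]

theorem pvIdxs_cons (x : Int) (B : List Int) :
    pvIdxs (x :: B) = (if x = 0 then [] else [(0 : Int)]) ++ (pvIdxs B).map (· + 1) := by
  unfold pvIdxs
  rw [PySem.List.enumerate_cons, pvEnum_shift B 0]
  have hfm := pvFM (PySem.List.enumerate B 0)
  by_cases hx : x = 0
  · rw [if_pos hx, List.nil_append]
    rw [List.filter_cons_of_neg (by simp [hx])]
    exact hfm
  · rw [if_neg hx]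
    rw [List.filter_cons_of_pos (by simp [hx]), List.map_cons, hfm]
    rfl

/-- main B-side lemma: gap sum of the boundary list equals the zero-run reference -/
theorem pvGap_main : ∀ (B : List Int) (c : Int), 0 ≤ c →
    pvGap ((-1 - c) :: pvIdxs B ++ [(B.length : Int)]) = pvZrun c B := by
  intro B
  induction B with
  | nil =>
    intro c hc
    show pvTri ((0 : Int) - (-1 - c) - 1) + pvGap [(0 : Int)] = pvTri c
    have h : (0 : Int) - (-1 - c) - 1 = c := by ring
    rw [h]
    simp [pvGap]
  | cons x bs ih =>
    intro c hc
    rw [pvIdxs_cons]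
    have e2 : (((x :: bs).length : Nat) : Int) = (bs.length : Int) + 1 := by
      push_cast [List.length_cons]; ring
    by_cases hx : x = 0
    · rw [if_pos hx, List.nil_append]
      have e1 : (-1 - c : Int) = (-1 - (c + 1)) + 1 := by ring
      have hmap : ((-1 - c) :: ((pvIdxs bs).map (· + 1)) ++ [((x :: bs).length : Int)] : List Int) =
          ((-1 - (c + 1)) :: pvIdxs bs ++ [(bs.length : Int)]).map (· + 1) := by
        simp only [List.map_cons, List.map_append, List.map_nil]
        rw [e2, e1]
      rw [hmap, pvGap_shift, ih (c + 1) (by omega)]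
      simp [pvZrun, hx]
    · rw [if_neg hx]
      show pvGap ((-1 - c) :: (0 : Int) :: ((pvIdxs bs).map (· + 1) ++ [((x :: bs).length : Int)])) = pvZrun c (x :: bs)
      have h1 : pvGap ((-1 - c) :: (0 : Int) :: ((pvIdxs bs).map (· + 1) ++ [((x :: bs).length : Int)]))
          = pvTri ((0 : Int) - (-1 - c) - 1) + pvGap ((0 : Int) :: ((pvIdxs bs).map (· + 1) ++ [((x :: bs).length : Int)])) := rfl
      rw [h1]
      have hc' : (0 : Int) - (-1 - c) - 1 = c := by ring
      rw [hc']
      have hmap : ((0 : Int) :: ((pvIdxs bs).map (· + 1) ++ [((x :: bs).length : Int)]) : List Int) =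
          ((-1 - 0) :: pvIdxs bs ++ [(bs.length : Int)]).map (· + 1) := by
        simp only [List.map_cons, List.map_append, List.map_nil]
        rw [e2]
        norm_num
      rw [hmap, pvGap_shift, ih 0 (le_refl 0)]
      simp [pvZrun, hx]

theorem solve_spec_aux (A : Int) (B : List Int) : solve A B = solve_alt A B := by
  unfold solve solve_alt
  simp only
  have hA := pvA_loop B 0 0 (le_refl 0)
  simp only at hA
  have hstep : (fun (st : Int × Int) x =>
      if x = 0 then (st.1 + 1, st.2)
      else (0, st.2 + PySem.Int.floordiv (st.1 * (st.1 + 1)) 2)) = pvStep := by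
    funext st x; rfl
  rw [hstep, hA]
  rw [pvZip_eq_gap]
  have hpos : (-1 : Int) :: (((PySem.List.enumerate B).filter (fun p => p.2 ≠ 0)).map (fun p => p.1)) ++ [(B.length : Int)]
      = (-1 - 0) :: pvIdxs B ++ [(B.length : Int)] := by
    norm_num [pvIdxs]
  rw [hpos, pvGap_main B 0 (le_refl 0)]
  ring

-- ===== VERDICT (by name: the statement is the Claim_ definition above) =====
theorem solve_spec : Claim_equal_solve := by
  intro A B _
  unfold Spec_solve
  exact solve_spec_aux A B
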